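-- pv_equiv track=rewrite | github.com/HazyResearch/evaporate | evaporate/profiler_utils.py | get_flattened_items
-- ===== SOURCE A (Python) =====
-- def get_flattened_items(content, chunk_size=500):
--     flattened_divs = str(content).split("\n")
--     flattened_divs = [ch for ch in flattened_divs if ch.strip() and ch.strip("\n").strip()]
--
--     clean_flattened_divs = []
--     for div in flattened_divs:
--         if len(str(div)) > chunk_size:
--             sub_divs = div.split("><")
--             if len(sub_divs) == 1:
--                 clean_flattened_divs.append(div)
--             else:
--                 clean_flattened_divs.append(sub_divs[0] + ">")
--                 for sd in sub_divs[1:-1]: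
--                     clean_flattened_divs.append("<" + sd + ">")
--                 clean_flattened_divs.append("<" + sub_divs[-1])
--         else:
--             clean_flattened_divs.append(div)
--     return clean_flattened_divs
-- ===== SOURCE B (Python) =====
-- def get_flattened_items(content, chunk_size=500):
--     result = []
--     for line in str(content).split("\n"):
--         if all(c.isspace() for c in line):
--             continue
--         if len(line) > chunk_size:
--             buf = ""
--             for c in line:
--                 if c == "<" and buf.endswith(">"):
--                     result.append(buf)
--                     buf = ""
--                 buf += c
--             result.append(buf)
--         else:
--             result.append(line)
--     return result
-- ===== Notes on version B (the rewrite author's own statement) =====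
-- stated objective: alternative
-- what changed: Replaces A's split-on-bracket-pair-then-reconstruct scheme (first/middle/last bracket re-attachment over the split pieces, plus the length-1 special case) by a single left-to-right character scan that accumulates a buffer and flushes it whenever an opening bracket follows a closing one, so pieces are emitted already carrying their brackets and no split, slicing or endpoint special-casing occurs; the blank-line filter pass becomes a per-character whitespace test inside the one loop.
import Mathlib
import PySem

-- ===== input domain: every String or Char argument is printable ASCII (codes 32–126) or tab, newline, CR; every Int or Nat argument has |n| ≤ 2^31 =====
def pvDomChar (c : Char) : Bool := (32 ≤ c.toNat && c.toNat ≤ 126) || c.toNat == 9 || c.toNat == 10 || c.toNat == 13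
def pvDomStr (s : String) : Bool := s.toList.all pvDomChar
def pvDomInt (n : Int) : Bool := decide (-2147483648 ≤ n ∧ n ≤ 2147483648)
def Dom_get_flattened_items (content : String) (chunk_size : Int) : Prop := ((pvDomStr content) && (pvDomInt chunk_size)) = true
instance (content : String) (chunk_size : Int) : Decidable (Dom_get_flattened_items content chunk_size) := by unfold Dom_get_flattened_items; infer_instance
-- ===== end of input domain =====

-- B replaces A's split-on-bracket-pair plus first/middle/last bracket reconstruction by a
-- single character scan that flushes its buffer at every close/open bracket boundary;
-- objective: alternative decomposition (same asymptotic cost).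

-- ===== PORT A =====
def get_flattened_items (content : String) (chunk_size : Int) : List String :=
  -- str(content).split("\n"): sep ≠ "" so split? is some
  let flattened_divs := (PySem.Str.split? content "\n").getD []
  let flattened_divs := flattened_divs.filter (fun ch =>
    (PySem.Str.strip ch != "") && (PySem.Str.strip (PySem.Str.stripChars ch "\n") != ""))
  flattened_divs.foldl (fun clean div =>
    if chunk_size < PySem.Str.len div then
      let sub_divs := (PySem.Str.split? div "><").getD []
      if sub_divs.length = 1 then clean ++ [div]
      else
        -- sub_divs[0] and sub_divs[-1]: sub_divs provably nonempty (split never returns [])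
        let clean := clean ++ [((PySem.List.pyGet? sub_divs 0).getD "") ++ ">"]
        let clean := (PySem.List.slice sub_divs (some 1) (some (-1))).foldl
          (fun a sd => a ++ ["<" ++ sd ++ ">"]) clean
        clean ++ ["<" ++ ((PySem.List.pyGet? sub_divs (-1)).getD "")]
    else clean ++ [div]) []

-- ===== PORT B =====
-- buf, a Python str grown with '+=' and tested with .endswith(">"), is carried as a
-- List Char (exact: ASCII-free of encoding issues; endswith ">" = getLast? == some '>')
def get_flattened_items_alt (content : String) (chunk_size : Int) : List String :=
  ((PySem.Str.split? content "\n").getD []).foldl (fun result line =>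
    if line.toList.all (fun c => PySem.Chars.isspace c) then result   -- continue
    else if chunk_size < PySem.Str.len line then
      let s := line.toList.foldl
        (fun (s : List String × List Char) c =>
          if c == '<' && s.2.getLast? == some '>' then (s.1 ++ [String.ofList s.2], [c])
          else (s.1, s.2 ++ [c])) (result, [])
      s.1 ++ [String.ofList s.2]
    else result ++ [line]) []

-- ===== PRECONDITION & SPEC =====
def Spec_get_flattened_items (content : String) (chunk_size : Int) (out : List String) : Prop := out = get_flattened_items_alt content chunk_size
instance (content : String) (chunk_size : Int) (out : List String) : Decidable (Spec_get_flattened_items content chunk_size out) := by unfold Spec_get_flattened_items; infer_instance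

-- ===== CLAIM (what is proved, stated in full; the proofs are below) =====
def Claim_equal_get_flattened_items : Prop := ∀ (content : String) (chunk_size : Int), Dom_get_flattened_items content chunk_size → Spec_get_flattened_items content chunk_size (get_flattened_items content chunk_size)

-- ===== LEMMAS AND PROOFS =====

-- clean (fuel-free) form of PySem.Chars.splitOn for a nonempty separator s0 :: srest
def pvSplit (s0 : Char) (srest : List Char) : List Char → List (List Char)
  | [] => [[]]
  | c :: rest =>
    if (s0 :: srest).isPrefixOf (c :: rest) then
      [] :: pvSplit s0 srest ((c :: rest).drop (s0 :: srest).length)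
    else (pvSplit s0 srest rest).modifyHead (c :: ·)
termination_by l => l.length
decreasing_by all_goals simp

-- join with separator (the inverse of pvSplit)
def pvJoin (sep : List Char) : List (List Char) → List Char
  | [] => []
  | [p] => p
  | p :: q :: t => p ++ sep ++ pvJoin sep (q :: t)

-- the pieces A builds from sub_divs (first + ">", "<" + mid + ">", "<" + last)
def pvGlueAux : List (List Char) → List (List Char)
  | [] => []
  | [q] => [['<'] ++ q]
  | q :: r :: t => (['<'] ++ q ++ ['>']) :: pvGlueAux (r :: t)

def pvGlue : List (List Char) → List (List Char)
  | [] => []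
  | [p] => [p]
  | p :: q :: t => (p ++ ['>']) :: pvGlueAux (q :: t)

-- look-ahead form of B's cutting scan: cut before every '<' preceded by '>'
def pvCut : List Char → List (List Char)
  | [] => [[]]
  | c :: rest =>
    if c == '>' && rest.head? == some '<' then [c] :: pvCut rest
    else (pvCut rest).modifyHead (c :: ·)

-- look-behind form: B's loop with pending buffer buf
def pvCutFrom (buf : List Char) : List Char → List (List Char)
  | [] => [buf]
  | c :: rest =>
    if c == '<' && buf.getLast? == some '>' then buf :: pvCutFrom [c] rest
    else pvCutFrom (buf ++ [c]) rest

theorem pvSplit_ne_nil (s0 : Char) (srest : List Char) (l : List Char) :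
    pvSplit s0 srest l ≠ [] := by
  fun_induction pvSplit s0 srest l with
  | case1 => simp
  | case2 c rest hp ih => simp
  | case3 c rest hp ih =>
    cases hX : pvSplit s0 srest rest with
    | nil => exact absurd hX ih
    | cons hd tl => simp [hX]

theorem pvSplitOn_go_eq (s0 : Char) (srest : List Char) :
    ∀ (fuel : Nat) (l cur : List Char) (accs : List (List Char)), l.length ≤ fuel →
      PySem.Chars.splitOn.go (s0 :: srest) fuel l cur accs =
        accs.reverse ++ (pvSplit s0 srest l).modifyHead (cur.reverse ++ ·) := by
  intro fuel
  induction fuel with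
  | zero =>
    intro l cur accs h
    have hl : l = [] := List.eq_nil_of_length_eq_zero (Nat.le_zero.mp h)
    subst hl
    rw [PySem.Chars.splitOn.go.eq_def]
    simp [pvSplit]
  | succ n ih =>
    intro l cur accs h
    rw [PySem.Chars.splitOn.go.eq_def]
    cases l with
    | nil => simp [pvSplit]
    | cons c rest =>
      rw [pvSplit]
      by_cases hp : (s0 :: srest).isPrefixOf (c :: rest) = true
      · simp only [if_pos hp]
        rw [ih _ [] _ (by simp at h ⊢; omega)]
        cases hX : pvSplit s0 srest ((c :: rest).drop (s0 :: srest).length) with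
        | nil => exact absurd hX (pvSplit_ne_nil _ _ _)
        | cons hd tl => simp [hX]
      · simp only [if_neg hp]
        rw [ih _ _ _ (by simp at h ⊢; omega)]
        cases hX : pvSplit s0 srest rest with
        | nil => exact absurd hX (pvSplit_ne_nil _ _ _)
        | cons hd tl => simp [hX]

theorem chars_splitOn_eq (s0 : Char) (srest : List Char) (l : List Char) :
    PySem.Chars.splitOn l (s0 :: srest) = pvSplit s0 srest l := by
  unfold PySem.Chars.splitOn
  rw [pvSplitOn_go_eq s0 srest (l.length + 1) l [] [] (by omega)]
  cases hX : pvSplit s0 srest l with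
  | nil => exact absurd hX (pvSplit_ne_nil _ _ _)
  | cons hd tl => simp

theorem pvJoin_cons_head (sep : List Char) (c : Char) (h : List Char) (t : List (List Char)) :
    pvJoin sep ((c :: h) :: t) = c :: pvJoin sep (h :: t) := by
  cases t <;> simp [pvJoin]

-- join(sep, split(sep, l)) = l
theorem pvJoin_pvSplit (s0 : Char) (srest : List Char) (l : List Char) :
    pvJoin (s0 :: srest) (pvSplit s0 srest l) = l := by
  fun_induction pvSplit s0 srest l with
  | case1 => simp [pvJoin]
  | case2 c rest hp ih =>
    obtain ⟨t, ht⟩ := List.isPrefixOf_iff_prefix.mp hp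
    cases hX : pvSplit s0 srest ((c :: rest).drop (s0 :: srest).length) with
    | nil => exact absurd hX (pvSplit_ne_nil _ _ _)
    | cons hd tl =>
      rw [hX] at ih
      simp only [hX, pvJoin, List.nil_append]
      rw [ih, ← ht, List.drop_left]
  | case3 c rest hp ih =>
    cases hX : pvSplit s0 srest rest with
    | nil => exact absurd hX (pvSplit_ne_nil _ _ _)
    | cons hd tl =>
      rw [hX] at ih
      simp only [hX, List.modifyHead_cons, pvJoin_cons_head]
      rw [ih]

theorem pvGlueAux_eq_modifyHead (ps : List (List Char)) (h : ps ≠ []) :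
    pvGlueAux ps = (pvGlue ps).modifyHead (fun p => '<' :: p) := by
  match ps with
  | [] => exact absurd rfl h
  | [q] => simp [pvGlueAux, pvGlue]
  | q :: r :: t => simp [pvGlueAux, pvGlue]

theorem pvGlue_modifyHead_cons (x : Char) (ps : List (List Char)) (h : ps ≠ []) :
    pvGlue (ps.modifyHead (x :: ·)) = (pvGlue ps).modifyHead (x :: ·) := by
  match ps with
  | [] => exact absurd rfl h
  | [p] => simp [pvGlue]
  | p :: q :: t => simp [pvGlue]

theorem pv_prefix_iff (c : Char) (rest : List Char) :
    (['>', '<'].isPrefixOf (c :: rest)) = (c == '>' && rest.head? == some '<') := by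
  cases rest with
  | nil => by_cases h1 : c = '>' <;> simp [List.isPrefixOf, h1]
  | cons d r =>
    by_cases h1 : c = '>' <;> by_cases h2 : d = '<'
    · simp [List.isPrefixOf, h1, h2]
    · simp [List.isPrefixOf, h1, h2, Ne.symm h2]
    · simp [List.isPrefixOf, h1, h2, Ne.symm h1]
    · have e1 : ('>' == c) = false := beq_eq_false_iff_ne.mpr (Ne.symm h1)
      have e2 : (c == '>') = false := beq_eq_false_iff_ne.mpr h1
      simp [List.isPrefixOf, e1, e2]

-- the look-ahead cut equals A's glued split pieces
theorem pvCut_eq_glue (cs : List Char) :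
    pvCut cs = pvGlue (pvSplit '>' ['<'] cs) := by
  fun_induction pvCut cs with
  | case1 => simp [pvSplit, pvGlue]
  | case2 c rest hp ih =>
    rw [pvSplit, if_pos (by rw [pv_prefix_iff]; exact hp)]
    obtain ⟨hc, hr⟩ := Bool.and_eq_true_iff.mp hp
    have hc' : c = '>' := by simpa using hc
    obtain ⟨rest2, rfl⟩ : ∃ r2, rest = '<' :: r2 := by
      cases rest with
      | nil => simp at hr
      | cons d r => exact ⟨r, by simpa using congrArg (fun x => x :: r) (by simpa using hr : d = '<')⟩
    have hsplit_rest : pvSplit '>' ['<'] ('<' :: rest2)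
        = (pvSplit '>' ['<'] rest2).modifyHead ('<' :: ·) := by
      rw [pvSplit, if_neg (by rw [pv_prefix_iff]; simp)]
    rw [ih, hsplit_rest, pvGlue_modifyHead_cons _ _ (pvSplit_ne_nil _ _ _)]
    simp only [List.drop, List.length_cons, List.length_nil]
    cases hX : pvSplit '>' ['<'] rest2 with
    | nil => exact absurd hX (pvSplit_ne_nil _ _ _)
    | cons p t =>
      subst hc'
      rw [show pvGlue ([] :: p :: t) = (([] : List Char) ++ ['>']) :: pvGlueAux (p :: t) from rfl,
          pvGlueAux_eq_modifyHead (p :: t) (by simp)]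
      simp
  | case3 c rest hp ih =>
    rw [pvSplit, if_neg (by rw [pv_prefix_iff]; exact hp), ih,
        pvGlue_modifyHead_cons _ _ (pvSplit_ne_nil _ _ _)]

theorem pvCut_ne_nil (cs : List Char) : pvCut cs ≠ [] := by
  fun_induction pvCut cs with
  | case1 => simp
  | case2 c rest h ih => simp
  | case3 c rest h ih =>
    cases hX : pvCut rest with
    | nil => exact absurd hX ih
    | cons p t => simp [hX]

-- the look-behind scan with a nonempty buffer is the look-ahead cut of (last char :: rest)
theorem pvCutFrom_append (cs : List Char) : ∀ (pre : List Char) (c : Char),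
    pvCutFrom (pre ++ [c]) cs = (pvCut (c :: cs)).modifyHead (pre ++ ·) := by
  induction cs with
  | nil =>
    intro pre c
    rw [pvCutFrom, pvCut, if_neg (by simp), pvCut]
    simp
  | cons d rest ih =>
    intro pre c
    rw [pvCutFrom]
    by_cases hcd : (d == '<' && (pre ++ [c]).getLast? == some '>') = true
    · have hc : c = '>' := by simp at hcd; exact hcd.2
      have hd : d = '<' := by simp at hcd; exact hcd.1
      rw [if_pos hcd, pvCut, if_pos (by simp [hc, hd])]
      have h1 : pvCutFrom [d] rest = pvCutFrom ([] ++ [d]) rest := by simp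
      rw [h1, ih [] d]
      cases hX : pvCut (d :: rest) with
      | nil => exact absurd hX (pvCut_ne_nil _)
      | cons p t => simp [hX]
    · rw [if_neg hcd, pvCut]
      have hlast : (pre ++ [c]).getLast? = some c := by simp
      rw [hlast] at hcd
      have hcond : (c == '>' && (d :: rest).head? == some '<') = false := by
        simp only [Bool.and_eq_false_iff]
        by_cases h2 : c = '>'
        · right
          have hd : ¬ d = '<' := by
            intro hd
            exact hcd (by simp [hd, h2])
          simp [hd]
        · left; simp [h2]
      have hcond' : ¬ (c == '>' && (d :: rest).head? == some '<') = true := by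
        rw [hcond]; exact Bool.false_ne_true
      rw [if_neg hcond', ih (pre ++ [c]) d]
      cases hX : pvCut (d :: rest) with
      | nil => exact absurd hX (pvCut_ne_nil _)
      | cons p t => simp [hX]

theorem pvCutFrom_nil (cs : List Char) : pvCutFrom [] cs = pvCut cs := by
  cases cs with
  | nil => rfl
  | cons c rest =>
    rw [pvCutFrom, if_neg (by simp)]
    rw [pvCutFrom_append rest [] c]
    cases hX : pvCut (c :: rest) with
    | nil => exact absurd hX (pvCut_ne_nil _)
    | cons p t => simp [hX]

-- B's inner loop, run from (out, buf) and flushed, appends map-ofList of pvCutFrom buf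
theorem pv_inner_fold (cs : List Char) : ∀ (out : List String) (buf : List Char),
    (let s := cs.foldl
        (fun (s : List String × List Char) c =>
          if c == '<' && s.2.getLast? == some '>' then (s.1 ++ [String.ofList s.2], [c])
          else (s.1, s.2 ++ [c])) (out, buf)
     s.1 ++ [String.ofList s.2])
      = out ++ (pvCutFrom buf cs).map String.ofList := by
  induction cs with
  | nil => intro out buf; simp [pvCutFrom]
  | cons c rest ih =>
    intro out buf
    rw [List.foldl_cons, pvCutFrom]
    by_cases h : (c == '<' && buf.getLast? == some '>') = true
    · rw [if_pos h, if_pos h, ih]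
      simp
    · rw [if_neg h, if_neg h, ih]

theorem pvGlueAux_map (q : List Char) (t : List (List Char)) :
    (pvGlueAux (q :: t)).map String.ofList =
      ((q :: t).dropLast).map (fun p => String.ofList (['<'] ++ p ++ ['>'])) ++
        [String.ofList (['<'] ++ (q :: t).getLastD [])] := by
  induction t generalizing q with
  | nil => simp [pvGlueAux]
  | cons r t' ih =>
    simp only [pvGlueAux, List.map_cons, ih r]
    simp [List.getLastD_cons]

theorem pv_slice_cons {α : Type} (x : α) (l : List α) :
    PySem.List.slice (x :: l) (some 1) (some (-1)) = l.dropLast := by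
  simp only [PySem.List.slice, PySem.List.clampIdx]
  norm_num
  rw [if_neg (by omega), List.dropLast_eq_take]

theorem pv_getLast?_cons {α : Type} (x : α) (l : List α) :
    (x :: l).getLast? = some ((x :: l).getLastD x) := by
  induction l generalizing x with
  | nil => simp
  | cons y l' ih =>
    rw [List.getLast?_cons_cons, ih y]
    simp only [List.getLastD_cons]

theorem pv_map_getLastD {α β : Type} (f : α → β) (d : α) (l : List α) :
    (l.map f).getLastD (f d) = f (l.getLastD d) := by
  induction l generalizing d with
  | nil => simp
  | cons y l' ih => simp only [List.map_cons, List.getLastD_cons]; exact ih y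

theorem pv_pyGet_neg_one {α : Type} (x : α) (l : List α) :
    PySem.List.pyGet? (x :: l) (-1) = some ((x :: l).getLastD x) := by
  simp only [PySem.List.pyGet?, PySem.List.pyIdx?]
  rw [if_neg (by omega), if_pos (by simp only [List.length_cons]; push_cast; omega)]
  have hlen : (x :: l).length - ((-(-1 : Int)).toNat) = (x :: l).length - 1 := by norm_num
  simp only [hlen]
  rw [show ((some ((x :: l).length - 1)).bind fun k => (x :: l)[k]?) = (x :: l)[(x :: l).length - 1]? from rfl]
  rw [← List.getLast?_eq_getElem?, pv_getLast?_cons]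

-- strip(ch) = "" iff every character of ch is whitespace
theorem pv_strip_nil_iff (cs : List Char) :
    PySem.Chars.strip cs = [] ↔ ∀ c ∈ cs, PySem.Chars.isspace c := by
  unfold PySem.Chars.strip PySem.Chars.rstrip PySem.Chars.lstrip
  rw [List.reverse_eq_nil_iff, List.dropWhile_eq_nil_iff]
  constructor
  · intro hh c hc
    have hsplit := List.takeWhile_append_dropWhile (p := PySem.Chars.isspace) (l := cs)
    rw [← hsplit] at hc
    rcases List.mem_append.mp hc with h1 | h1
    · exact List.mem_takeWhile_imp h1
    · exact hh c (List.mem_reverse.mpr h1)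
  · intro hh c hc
    exact hh c ((List.dropWhile_sublist _).subset (List.mem_reverse.mp hc))

theorem pv_mem_dropWhile {α : Type} (p : α → Bool) (l : List α) (x : α)
    (hx : x ∈ l) (hpx : ¬ p x = true) : x ∈ l.dropWhile p := by
  induction l with
  | nil => simp at hx
  | cons a l' ih =>
    by_cases hpa : p a = true
    · rw [List.dropWhile_cons_of_pos hpa]
      rcases List.mem_cons.mp hx with h1 | h1
      · subst h1; exact absurd hpa hpx
      · exact ih h1
    · rw [List.dropWhile_cons_of_neg hpa]
      exact hx

-- the strip("\n").strip() conjunct of A's filter is implied by the strip() conjunct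
theorem pv_cond_eq (ch : String) :
    ((PySem.Str.strip ch != "") && (PySem.Str.strip (PySem.Str.stripChars ch "\n") != "")) =
      (PySem.Str.strip ch != "") := by
  cases hs : (PySem.Str.strip ch != "") with
  | false => simp
  | true =>
    simp only [Bool.true_and]
    have h1 : PySem.Chars.strip ch.toList ≠ [] := by
      intro hc
      rw [bne_iff_ne] at hs
      apply hs
      have : (PySem.Str.strip ch).toList = [] := by rw [PySem.Str.toList_strip, hc]
      exact String.toList_eq_nil_iff.mp this
    obtain ⟨c, hc, hcs⟩ : ∃ c ∈ ch.toList, ¬ PySem.Chars.isspace c = true := by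
      by_contra hc
      push_neg at hc
      exact h1 ((pv_strip_nil_iff ch.toList).mpr (by simpa using hc))
    have hcn : c ≠ '\n' := by
      intro he; subst he; exact hcs (by decide)
    have hcmem : c ∈ PySem.Chars.stripChars ch.toList ['\n'] := by
      unfold PySem.Chars.stripChars
      have hq : ¬ (['\n'].contains c = true) := by simpa using hcn
      rw [List.mem_reverse]
      apply pv_mem_dropWhile _ _ _ _ hq
      rw [List.mem_reverse]
      exact pv_mem_dropWhile _ _ _ hc hq
    have h2 : PySem.Chars.strip (PySem.Chars.stripChars ch.toList ['\n']) ≠ [] := by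
      intro hc2
      exact hcs ((pv_strip_nil_iff _).mp hc2 c hcmem)
    have : (PySem.Str.strip (PySem.Str.stripChars ch "\n") != "") = true := by
      rw [bne_iff_ne]
      intro he
      apply h2
      have := congrArg String.toList he
      rw [PySem.Str.toList_strip, PySem.Str.toList_stripChars] at this
      simpa using this
    rw [this]

-- A's strip-based keep condition is the negation of B's all-whitespace skip condition
theorem pv_blank_eq (ch : String) :
    (PySem.Str.strip ch != "") = !(ch.toList.all (fun c => PySem.Chars.isspace c)) := by
  by_cases h : ∀ c ∈ ch.toList, PySem.Chars.isspace c = true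
  · have h1 : PySem.Chars.strip ch.toList = [] := (pv_strip_nil_iff _).mpr h
    have h2 : PySem.Str.strip ch = "" :=
      String.toList_eq_nil_iff.mp (by rw [PySem.Str.toList_strip, h1])
    have hall : ch.toList.all (fun c => PySem.Chars.isspace c) = true := List.all_eq_true.mpr h
    simp [h2, hall]
  · have h1 : PySem.Chars.strip ch.toList ≠ [] := fun hc => h ((pv_strip_nil_iff _).mp hc)
    have h2 : PySem.Str.strip ch ≠ "" := by
      intro he
      apply h1
      have := congrArg String.toList he
      rw [PySem.Str.toList_strip] at this
      simpa using this
    have h4 : ch.toList.all (fun c => PySem.Chars.isspace c) = false := by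
      simpa using h
    rw [h4]
    simpa using h2

-- for any div, A's long-div branch builds exactly B's scan output
theorem pv_bigdiv (div : String) (acc : List String) :
    (let sub_divs := (PySem.Str.split? div "><").getD []
     if sub_divs.length = 1 then acc ++ [div]
     else
       let acc2 := acc ++ [((PySem.List.pyGet? sub_divs 0).getD "") ++ ">"]
       let acc3 := (PySem.List.slice sub_divs (some 1) (some (-1))).foldl
         (fun a sd => a ++ ["<" ++ sd ++ ">"]) acc2
       acc3 ++ ["<" ++ ((PySem.List.pyGet? sub_divs (-1)).getD "")])
    = acc ++ (pvCut div.toList).map String.ofList := by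
  have hsp : (PySem.Str.split? div "><").getD [] = (pvSplit '>' ['<'] div.toList).map String.ofList := by
    simp only [PySem.Str.split?, PySem.Chars.split?]
    rw [if_neg (by decide)]
    simp only [Option.map_some, Option.getD_some]
    rw [show ("><" : String).toList = ['>', '<'] from rfl, chars_splitOn_eq]
  rw [pvCut_eq_glue]
  simp only [hsp]
  cases hps : pvSplit '>' ['<'] div.toList with
  | nil => exact absurd hps (pvSplit_ne_nil _ _ _)
  | cons p0 tl =>
    have hjoin := pvJoin_pvSplit '>' ['<'] div.toList
    rw [hps] at hjoin
    cases tl with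
    | nil =>
      have hdiv : String.ofList p0 = div := by
        rw [show pvJoin ['>', '<'] [p0] = p0 from rfl] at hjoin
        rw [hjoin, String.ofList_toList]
      simp [pvGlue, hdiv]
    | cons p1 t =>
      have hlen : ¬ ((List.map String.ofList (p0 :: p1 :: t)).length = 1) := by simp
      rw [if_neg hlen]
      simp only [List.map_cons]
      have hget0 : PySem.List.pyGet? (String.ofList p0 :: String.ofList p1 :: List.map String.ofList t) 0
          = some (String.ofList p0) := by
        simp only [PySem.List.pyGet?, PySem.List.pyIdx?]
        rw [if_pos (by omega), if_pos (by simp only [List.length_cons]; push_cast; omega)]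
        simp
      rw [hget0]
      rw [pv_slice_cons, pv_pyGet_neg_one]
      simp only [Option.getD_some]
      rw [PySem.List.foldl_append_singleton_eq_map]
      have hglue : pvGlue (p0 :: p1 :: t) = (p0 ++ ['>']) :: pvGlueAux (p1 :: t) := rfl
      rw [hglue, List.map_cons, pvGlueAux_map]
      have e1 : String.ofList p0 ++ ">" = String.ofList (p0 ++ ['>']) := by
        rw [String.ofList_append]
      have e2 : ∀ p : List Char, "<" ++ String.ofList p ++ ">" = String.ofList (['<'] ++ p ++ ['>']) := by
        intro p
        rw [String.ofList_append, String.ofList_append]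
      have e3 : (String.ofList p1 :: List.map String.ofList t).dropLast
          = ((p1 :: t).dropLast).map String.ofList := by
        rw [← List.map_cons, List.map_dropLast]
      have e4 : (String.ofList p0 :: String.ofList p1 :: List.map String.ofList t).getLastD (String.ofList p0)
          = String.ofList ((p1 :: t).getLastD []) := by
        rw [List.getLastD_cons, ← List.map_cons, pv_map_getLastD]
        have hdflt : (p1 :: t).getLastD p0 = (p1 :: t).getLastD [] := by
          simp only [List.getLastD_cons]
        rw [hdflt]
      rw [e1, e3, e4]
      have e5 : "<" ++ String.ofList ((p1 :: t).getLastD [])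
          = String.ofList (['<'] ++ (p1 :: t).getLastD []) := by
        rw [String.ofList_append]
      rw [e5]
      simp only [List.map_map, Function.comp_def]
      simp only [e2]
      simp [List.append_assoc]

-- ===== VERDICT (by name: the statement is the Claim_ definition above) =====
theorem get_flattened_items_spec : Claim_equal_get_flattened_items := by
  intro content chunk_size _
  unfold Spec_get_flattened_items get_flattened_items get_flattened_items_alt
  rw [List.foldl_filter]
  apply PySem.List.foldl_congr_mem
  intro acc div _
  rw [pv_cond_eq, pv_blank_eq]
  by_cases hsp : div.toList.all (fun c => PySem.Chars.isspace c) = true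
  · simp [hsp]
  · have hsp' : div.toList.all (fun c => PySem.Chars.isspace c) = false := by
      simpa using hsp
    rw [hsp']
    simp only [Bool.not_false, if_true, Bool.false_eq_true, if_false]
    by_cases hlen : chunk_size < PySem.Str.len div
    · rw [if_pos hlen, if_pos hlen]
      have hinner := pv_inner_fold div.toList acc []
      simp only at hinner
      rw [hinner, pvCutFrom_nil]
      exact pv_bigdiv div acc
    · rw [if_neg hlen, if_neg hlen]
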